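-- pv_equiv track=rewrite | github.com/Gyuchool/Algorithm | 프로그래머스/코딩테스트/야간 전술보행.py | solution
-- ===== SOURCE A (Python) =====
-- def solution(distance, scope, times):
--     answer = distance
--
--     for i in range(len(scope)):
--         s = min(scope[i])
--         e = max(scope[i])
--         ts = times[i][0]
--         te = times[i][1]
--         time = ts + te
--         for j in range(s, e + 1):
--             if ts < j % time or j%time == 0:
--                 continue
--             else:
--                 answer = min(answer, j)
--     return answer
-- ===== SOURCE B (Python) =====
-- def first_watched(s, e, ts, period):
--     """First position in [s, e] whose phase in the period-cycle is watched, else None.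
--
--     Phases repeat every abs(period) steps, so after scanning one full cycle
--     without a hit there is nothing to find."""
--     for j in range(s, e + 1):
--         if j % period and j % period <= ts:
--             return j
--         if j - s >= abs(period):
--             return None
--     return None
--
--
-- def solution(distance, scope, times):
--     answer = distance
--     for sc, tm in zip(scope, times):
--         j = first_watched(min(sc), max(sc), tm[0], tm[0] + tm[1])
--         if j is not None:
--             answer = min(answer, j)
--     return answer
-- ===== Notes on version B (the rewrite author's own statement) =====
-- stated objective: faster
-- what changed: A scans every position j in [min(scope[i]), max(scope[i])] and accumulates the min over all caught positions; B uses a helper that returns the FIRST watched position per scope and stops early, scanning at most one full cycle of abs(ts+te) positions (phases repeat, so a hit-free cycle proves there is none); Pre_ excludes only the inputs where A raises (empty scope[i], times shorter than scope, times[i] with fewer than 2 entries, ts+te = 0).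
import Mathlib
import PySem

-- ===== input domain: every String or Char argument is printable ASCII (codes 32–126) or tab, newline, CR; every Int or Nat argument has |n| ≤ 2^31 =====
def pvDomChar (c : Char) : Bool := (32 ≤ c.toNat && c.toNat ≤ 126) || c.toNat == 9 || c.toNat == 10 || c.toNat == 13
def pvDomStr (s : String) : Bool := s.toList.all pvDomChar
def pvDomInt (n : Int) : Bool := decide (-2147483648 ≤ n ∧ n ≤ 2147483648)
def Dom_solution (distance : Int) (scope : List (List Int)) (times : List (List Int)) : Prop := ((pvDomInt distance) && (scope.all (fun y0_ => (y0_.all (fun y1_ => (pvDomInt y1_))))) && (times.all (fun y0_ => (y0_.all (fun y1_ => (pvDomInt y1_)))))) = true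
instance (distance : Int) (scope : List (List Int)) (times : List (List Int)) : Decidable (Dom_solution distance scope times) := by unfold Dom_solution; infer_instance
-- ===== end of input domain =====

-- B replaces A's full scan of every scope range (min-accumulation over all caught positions) by a
-- helper returning the FIRST watched position, which stops at the first hit and scans at most one
-- full cycle of |ts+te| positions (objective: faster).

-- ===== PORT A =====
def solution (distance : Int) (scope : List (List Int)) (times : List (List Int)) : Int :=
  (PySem.List.pyRange 0 (scope.length : Int) 1).foldl (fun answer i =>
    let sc := PySem.List.pyGetD scope i []
    let s := PySem.List.minD sc (fun y => y) 0
    let e := PySem.List.maxD sc (fun y => y) 0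
    let ts := PySem.List.pyGetD (PySem.List.pyGetD times i []) 0 0
    let te := PySem.List.pyGetD (PySem.List.pyGetD times i []) 1 0
    let time := ts + te
    (PySem.List.pyRange s (e + 1) 1).foldl (fun answer j =>
      if ts < PySem.Int.mod j time ∨ PySem.Int.mod j time = 0 then answer
      else min answer j) answer) distance

-- ===== PORT B =====
-- the loop body of first_watched: return j on a watched phase, give up after one full cycle
def fwGo (s ts period : Int) : List Int → Option Int
  | [] => none
  | j :: rest =>
    if PySem.Int.mod j period ≠ 0 ∧ PySem.Int.mod j period ≤ ts then some j
    else if |period| ≤ j - s then none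
    else fwGo s ts period rest

def firstWatched (s e ts period : Int) : Option Int :=
  fwGo s ts period (PySem.List.pyRange s (e + 1) 1)

def solution_alt (distance : Int) (scope : List (List Int)) (times : List (List Int)) : Int :=
  (scope.zip times).foldl (fun answer pr =>
    match firstWatched (PySem.List.minD pr.1 (fun y => y) 0) (PySem.List.maxD pr.1 (fun y => y) 0)
        (PySem.List.pyGetD pr.2 0 0)
        (PySem.List.pyGetD pr.2 0 0 + PySem.List.pyGetD pr.2 1 0) with
    | some j => min answer j
    | none => answer) distance

-- ===== PRECONDITION & SPEC =====
-- Pre_ excludes exactly the inputs where the Python A raises: an empty scope[i] (min/max of an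
-- empty list is a ValueError), times shorter than scope or times[i] shorter than 2 (IndexError),
-- and times[i][0] + times[i][1] = 0 (the inner range is never empty, so j % 0 is a ZeroDivisionError).
def Pre_solution (distance : Int) (scope : List (List Int)) (times : List (List Int)) : Prop :=
  scope.length ≤ times.length ∧
  (∀ sc ∈ scope, sc ≠ []) ∧
  (∀ tm ∈ times.take scope.length,
    2 ≤ tm.length ∧ PySem.List.pyGetD tm 0 0 + PySem.List.pyGetD tm 1 0 ≠ 0)
instance (distance : Int) (scope : List (List Int)) (times : List (List Int)) : Decidable (Pre_solution distance scope times) := by unfold Pre_solution; infer_instance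
def pvWitness_solution : Int × List (List Int) × List (List Int) := (12, [[3, 7], [5, 8]], [[4, 5], [3, 10]])

def Spec_solution (distance : Int) (scope : List (List Int)) (times : List (List Int)) (out : Int) : Prop := out = solution_alt distance scope times
instance (distance : Int) (scope : List (List Int)) (times : List (List Int)) (out : Int) : Decidable (Spec_solution distance scope times out) := by unfold Spec_solution; infer_instance

-- ===== CLAIM (what is proved, stated in full; the proofs are below) =====
def Claim_equal_solution : Prop := ∀ (distance : Int) (scope : List (List Int)) (times : List (List Int)), Dom_solution distance scope times → Pre_solution distance scope times → Spec_solution distance scope times (solution distance scope times)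

-- ===== LEMMAS AND PROOFS =====

-- 'position j is caught', as the Boolean test B uses
def watched (ts p j : Int) : Bool := decide (PySem.Int.mod j p ≠ 0 ∧ PySem.Int.mod j p ≤ ts)

-- the per-pair step of A (inner brute-force scan)
def gStep (a : Int) (sc tm : List Int) : Int :=
  let s := PySem.List.minD sc (fun y => y) 0
  let e := PySem.List.maxD sc (fun y => y) 0
  let ts := PySem.List.pyGetD tm 0 0
  let te := PySem.List.pyGetD tm 1 0
  let time := ts + te
  (PySem.List.pyRange s (e + 1) 1).foldl (fun answer j =>
    if ts < PySem.Int.mod j time ∨ PySem.Int.mod j time = 0 then answer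
    else min answer j) a

-- index fold = zip fold
lemma outer_fold (f : Int → List Int → List Int → Int) :
    ∀ (xs ys : List (List Int)) (a : Int), xs.length ≤ ys.length →
    (PySem.List.pyRange 0 (xs.length : Int) 1).foldl
      (fun acc i => f acc (PySem.List.pyGetD xs i []) (PySem.List.pyGetD ys i [])) a
    = (xs.zip ys).foldl (fun acc pr => f acc pr.1 pr.2) a := by
  intro xs ys a hlen
  rw [PySem.List.pyRange_zero_natCast, List.foldl_map]
  simp only [PySem.List.pyGetD_natCast]
  induction xs generalizing ys a with
  | nil => rfl
  | cons x t ih =>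
    cases ys with
    | nil => simp at hlen
    | cons y u =>
      have hlen' : t.length ≤ u.length := by simpa using hlen
      rw [List.length_cons, List.range_succ_eq_map, List.foldl_cons, List.foldl_map]
      simp only [List.getD_cons_zero, Nat.succ_eq_add_one, List.getD_cons_succ]
      rw [List.zip_cons_cons, List.foldl_cons]
      exact ih u (f a x y) hlen'

-- A's skip test is the negation of B's watched test
lemma stepfun_eq (ts p : Int) :
    (fun (ans j : Int) => if ts < PySem.Int.mod j p ∨ PySem.Int.mod j p = 0 then ans else min ans j)
    = (fun (ans j : Int) => if watched ts p j then min ans j else ans) := by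
  funext ans j
  by_cases h : PySem.Int.mod j p ≠ 0 ∧ PySem.Int.mod j p ≤ ts
  · have hs : ¬(ts < PySem.Int.mod j p ∨ PySem.Int.mod j p = 0) := by
      obtain ⟨h1, h2⟩ := h; omega
    rw [if_neg hs, if_pos (show watched ts p j = true from by simpa [watched] using h)]
  · have hs : ts < PySem.Int.mod j p ∨ PySem.Int.mod j p = 0 := by
      by_cases h1 : PySem.Int.mod j p = 0
      · exact Or.inr h1
      · exact Or.inl (by omega)
    rw [if_pos hs, if_neg (show ¬ watched ts p j = true from by simpa [watched] using h)]

-- a min-accumulating fold over a strictly increasing list keeps only the first hit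
lemma foldl_keep (c : Int → Bool) :
    ∀ (l : List Int) (a : Int), (∀ j ∈ l, a ≤ j) →
    l.foldl (fun ans j => if c j then min ans j else ans) a = a := by
  intro l
  induction l with
  | nil => intro a _; rfl
  | cons x t ih =>
    intro a h
    have hax : min a x = a := min_eq_left (h x (by simp))
    have hx : (if c x then min a x else a) = a := by rw [hax]; split <;> rfl
    simp only [List.foldl_cons, hx]
    exact ih a (fun j hj => h j (by simp [hj]))

lemma foldl_first_hit (c : Int → Bool) :
    ∀ (l : List Int), l.Pairwise (· < ·) → ∀ (a : Int),
    l.foldl (fun ans j => if c j then min ans j else ans) a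
    = (match l.find? c with | some j => min a j | none => a) := by
  intro l
  induction l with
  | nil => intro _ a; rfl
  | cons x t ih =>
    intro hp a
    obtain ⟨hx, ht⟩ := List.pairwise_cons.mp hp
    by_cases hc : c x = true
    · rw [List.find?_cons_of_pos hc]
      simp only [List.foldl_cons, if_pos hc]
      exact foldl_keep c t (min a x)
        (fun j hj => le_trans (min_le_right a x) (le_of_lt (hx j hj)))
    · rw [List.find?_cons_of_neg hc]
      simp only [List.foldl_cons, hc]
      simpa using ih ht a

-- Python's % depends on the argument only through its residue mod |p|
lemma pymod_congr (p x y : Int) (hp : p ≠ 0) (h : x % |p| = y % |p|) :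
    PySem.Int.mod x p = PySem.Int.mod y p := by
  have habs : (0:Int) < |p| := abs_pos.mpr hp
  have hd : |p| ∣ x - y :=
    Int.dvd_of_emod_eq_zero (Int.emod_eq_emod_iff_emod_sub_eq_zero.mp h)
  rcases lt_or_gt_of_ne hp with hneg | hpos
  · have hpe : p = -|p| := by have := abs_of_neg hneg; omega
    have hx := PySem.Int.mod_neg_neg (-x) |p|
    have hy := PySem.Int.mod_neg_neg (-y) |p|
    rw [neg_neg] at hx hy
    have hxy : (-x) % |p| = (-y) % |p| := by
      refine Int.emod_eq_emod_iff_emod_sub_eq_zero.mpr (Int.emod_eq_zero_of_dvd ?_)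
      have heq : (-x) - (-y) = -(x - y) := by ring
      rw [heq]; exact dvd_neg.mpr hd
    rw [hpe, hx, hy, PySem.Int.mod_eq_emod_of_pos habs, PySem.Int.mod_eq_emod_of_pos habs, hxy]
  · rw [PySem.Int.mod_eq_emod_of_pos hpos, PySem.Int.mod_eq_emod_of_pos hpos]
    rwa [abs_of_pos hpos] at h

lemma watched_congr (ts p x y : Int) (hp : p ≠ 0) (h : x % |p| = y % |p|) :
    watched ts p x = watched ts p y := by
  unfold watched; rw [pymod_congr p x y hp h]

-- B's early-exit cycle scan computes the first hit of the whole range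
lemma fwGo_eq_find (ts p s : Int) (hp : p ≠ 0) :
    ∀ (l : List Int), ∀ (j0 b : Int), l = PySem.List.pyRange j0 b 1 → s ≤ j0 →
      (∀ k, s ≤ k → k < j0 → watched ts p k = false) →
      fwGo s ts p l = l.find? (watched ts p) := by
  have habs : (0:Int) < |p| := abs_pos.mpr hp
  intro l
  induction l with
  | nil => intro j0 b _ _ _; rfl
  | cons j rest ih =>
    intro j0 b hl hs hpre
    have hj0b : j0 < b := by
      by_contra hge
      rw [PySem.List.pyRange_one_eq_nil (by omega)] at hl
      exact List.cons_ne_nil j rest hl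
    rw [PySem.List.pyRange_one_cons (by omega)] at hl
    obtain ⟨hj, hrest⟩ := List.cons_eq_cons.mp hl
    subst hj
    by_cases hw : PySem.Int.mod j p ≠ 0 ∧ PySem.Int.mod j p ≤ ts
    · have hwb : watched ts p j = true := by simp [watched, hw]
      rw [List.find?_cons_of_pos hwb]
      simp only [fwGo, if_pos hw]
    · have hwb : ¬ watched ts p j = true := by simp [watched]; intro h1; omega
      have hwf : watched ts p j = false := Bool.not_eq_true _ ▸ (by simpa using hwb)
      by_cases hcut : |p| ≤ j - s
      · -- a full watch-free cycle: nothing later is watched either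
        have hnone : ∀ k ∈ j :: rest, ¬ watched ts p k = true := by
          intro k hk
          rw [hl] at hk
          have hk1 : j ≤ k := by
            rcases List.mem_cons.mp hk with hke | hkm
            · omega
            · have := (PySem.List.mem_pyRange_one.mp hkm).1; omega
          have hu0 : 0 ≤ (k - s) % |p| := Int.emod_nonneg _ (by omega)
          have hup : (k - s) % |p| < |p| := Int.emod_lt_of_pos _ habs
          have hcong : k % |p| = (s + (k - s) % |p|) % |p| := by
            conv_lhs => rw [show k = s + (k - s) by ring]
            rw [Int.add_emod s (k - s), Int.add_emod s ((k - s) % |p|),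
              Int.emod_emod_of_dvd _ dvd_rfl]
          have := watched_congr ts p k (s + (k - s) % |p|) hp hcong
          rw [this, hpre (s + (k - s) % |p|) (by omega) (by omega)]
          simp
        rw [List.find?_eq_none.mpr hnone]
        simp only [fwGo, if_neg hw, if_pos hcut]
      · rw [List.find?_cons_of_neg hwb]
        simp only [fwGo, if_neg hw, if_neg hcut]
        refine ih (j + 1) b hrest (by omega) ?_
        intro k hk1 hk2
        by_cases hkj : k = j
        · subst hkj; exact hwf
        · exact hpre k hk1 (by omega)

-- the per-pair step of A equals B's first-watched closed step
lemma per_pair (a s e ts te : Int) (hp : ts + te ≠ 0) :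
    (PySem.List.pyRange s (e + 1) 1).foldl (fun answer j =>
      if ts < PySem.Int.mod j (ts + te) ∨ PySem.Int.mod j (ts + te) = 0 then answer
      else min answer j) a
    = (match firstWatched s e ts (ts + te) with
       | some j => min a j
       | none => a) := by
  rw [stepfun_eq ts (ts + te),
    foldl_first_hit (watched ts (ts + te)) _ (PySem.List.pairwise_lt_pyRange_one s (e + 1)) a]
  unfold firstWatched
  rw [fwGo_eq_find ts (ts + te) s hp _ s (e + 1) rfl le_rfl
    (fun k hk1 hk2 => absurd hk2 (by omega))]

lemma zip_take_right {α β : Type} : ∀ (xs : List α) (ys : List β), xs.zip ys = xs.zip (ys.take xs.length) := by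
  intro xs
  induction xs with
  | nil => intro ys; rfl
  | cons x t ih =>
    intro ys
    cases ys with
    | nil => rfl
    | cons y u => simp [List.zip_cons_cons, ih u]

-- ===== VERDICT (by name: the statement is the Claim_ definition above) =====
theorem solution_spec : Claim_equal_solution := by
  intro distance scope times _ hpre
  obtain ⟨hlen, _, htm⟩ := hpre
  unfold Spec_solution
  have hA : solution distance scope times
      = (PySem.List.pyRange 0 (scope.length : Int) 1).foldl
          (fun acc i => gStep acc (PySem.List.pyGetD scope i []) (PySem.List.pyGetD times i [])) distance := rfl
  rw [hA, outer_fold gStep scope times distance hlen]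
  show (scope.zip times).foldl (fun acc pr => gStep acc pr.1 pr.2) distance = solution_alt distance scope times
  unfold solution_alt
  apply List.foldl_ext
  intro a pr hpr
  have h2 : pr.2 ∈ times.take scope.length := by
    have := zip_take_right scope times ▸ hpr
    exact (List.of_mem_zip (a := pr.1) (b := pr.2) (by simpa using this)).2
  have hne := (htm pr.2 h2).2
  exact per_pair a _ _ _ _ hne
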